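-- pv_equiv track=rewrite | github.com/oliver94s/aoc2021 | day06/lanternfish.py | calc_population
-- ===== SOURCE A (Python) =====
-- def calc_population(laternfish, days):
--     fish_additions = [0] * 7
--     for day in range(days):
--         # Counting amount of fish given birth to
--         day_idx = day % 7
--         new_fish = laternfish[day_idx]
--
--         # Adding the babies produced previously into the
--         # population
--         laternfish[day_idx] += fish_additions[day_idx]
--         fish_additions[day_idx] = 0
--
--         # Adding babies to future population
--         fish_additions[(day_idx + 2) % 7] = new_fish
--
--     # realize that I need to add the ones that were not added yet
--     return sum(laternfish) + sum(fish_additions)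
-- ===== SOURCE B (Python) =====
-- def calc_population(laternfish, days):
--     # Derived 9-day linear recurrence: spawn(d) = lf[d] for d < 7,
--     # else spawn(d-7) + spawn(d-9) (0 when d < 9); the population just
--     # grows by spawn(d) each day.  One running total + a 9-slot ring
--     # buffer instead of mutating two 7-slot arrays and summing at the end.
--     total = sum(laternfish)
--     ring = [0] * 9
--     for d in range(days):
--         if d < 7:
--             x = laternfish[d]
--         else:
--             x = ring[(d - 7) % 9] + ring[d % 9]
--         total += x
--         ring[d % 9] = x
--     return total
-- ===== Notes on version B (the rewrite author's own statement) =====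
-- stated objective: simpler
-- what changed: Replaced A's two mutated 7-slot arrays (population by weekday plus pending-addition array, summed at the end) by the derived 9-day spawn recurrence spawn(d)=spawn(d-7)+spawn(d-9) kept in a single 9-slot ring buffer with a running total; B does not mutate its argument.
import Mathlib
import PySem

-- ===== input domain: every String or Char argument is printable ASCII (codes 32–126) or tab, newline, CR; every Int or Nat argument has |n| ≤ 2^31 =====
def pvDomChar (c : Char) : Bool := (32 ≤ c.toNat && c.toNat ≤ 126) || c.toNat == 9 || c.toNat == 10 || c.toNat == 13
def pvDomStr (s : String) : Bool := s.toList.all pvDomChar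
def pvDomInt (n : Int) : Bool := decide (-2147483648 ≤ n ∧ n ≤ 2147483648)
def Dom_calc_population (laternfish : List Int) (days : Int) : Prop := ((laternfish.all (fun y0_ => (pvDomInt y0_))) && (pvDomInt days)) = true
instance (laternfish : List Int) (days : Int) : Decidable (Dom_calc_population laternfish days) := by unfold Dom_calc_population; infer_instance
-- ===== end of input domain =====

-- B replaces A's two mutated 7-slot arrays by the derived 9-day spawn recurrence kept in one
-- ring buffer with a running total (simpler, same asymptotic cost).
-- Return-value equivalence only: the Python A mutates its `laternfish` argument in place, B does not.

-- ===== PORT A =====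
-- loop state: (laternfish, fish_additions); `day` counts up, the last Nat is the remaining days.
-- `List.getD i 0` is exact for Python's `xs[i]` here: Pre_ keeps every used index in range.
def pvStepsA : List Int → List Int → Nat → Nat → List Int × List Int
  | L, F, _, 0 => (L, F)
  | L, F, day, n + 1 =>
      let i := day % 7
      let new_fish := L.getD i 0
      let L' := L.set i (L.getD i 0 + F.getD i 0)
      let F' := (F.set i 0).set ((i + 2) % 7) new_fish
      pvStepsA L' F' (day + 1) n

def calc_population (laternfish : List Int) (days : Int) : Int :=
  let r := pvStepsA laternfish (List.replicate 7 0) 0 days.toNat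
  r.1.sum + r.2.sum

-- ===== PORT B =====
-- loop state: (total, ring); `List.getD d 0` is exact for `laternfish[d]` under Pre_ (d in range).
def pvStepsB (lat : List Int) : Int → List Int → Nat → Nat → Int
  | total, _, _, 0 => total
  | total, ring, d, n + 1 =>
      let x := if d < 7 then lat.getD d 0
               else ring.getD ((d - 7) % 9) 0 + ring.getD (d % 9) 0
      pvStepsB lat (total + x) (ring.set (d % 9) x) (d + 1) n

def calc_population_alt (laternfish : List Int) (days : Int) : Int :=
  pvStepsB laternfish laternfish.sum (List.replicate 9 0) 0 days.toNat

-- ===== PRECONDITION & SPEC =====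
-- Pre_ is exactly where the Python A returns: range(days) is empty, or every used index
-- day % 7 (day < days) is < len(laternfish); otherwise A (and B alike) raise IndexError.
def Pre_calc_population (laternfish : List Int) (days : Int) : Prop :=
  days ≤ 0 ∨ min days 7 ≤ (laternfish.length : Int)
instance (laternfish : List Int) (days : Int) : Decidable (Pre_calc_population laternfish days) := by
  unfold Pre_calc_population; infer_instance

def pvWitness_calc_population : List Int × Int := ([3, 4, 3, 1, 2, 5, 6], 18)

def Spec_calc_population (laternfish : List Int) (days : Int) (out : Int) : Prop := out = calc_population_alt laternfish days
instance (laternfish : List Int) (days : Int) (out : Int) : Decidable (Spec_calc_population laternfish days out) := by unfold Spec_calc_population; infer_instance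

-- ===== CLAIM (what is proved, stated in full; the proofs are below) =====
def Claim_equal_calc_population : Prop := ∀ (laternfish : List Int) (days : Int), Dom_calc_population laternfish days → Pre_calc_population laternfish days → Spec_calc_population laternfish days (calc_population laternfish days)

-- ===== LEMMAS AND PROOFS =====

-- the abstract spawn sequence both loops realise: fish born at day d
def pvBirths (L : List Int) (d : Nat) : Int :=
  if d < 7 then L.getD d 0
  else pvBirths L (d - 7) + (if d < 9 then 0 else pvBirths L (d - 9))
termination_by d
decreasing_by all_goals omega

-- value of fish_additions[j] after k completed days of A's loop
def pvFval (L0 : List Int) (k j : Nat) : Int :=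
  if 1 ≤ k ∧ j = (k + 1) % 7 then pvBirths L0 (k - 1)
  else if 2 ≤ k ∧ j = k % 7 then pvBirths L0 (k - 2)
  else 0

lemma pvBirths_lt7 (L : List Int) (d : Nat) (h : d < 7) : pvBirths L d = L.getD d 0 := by
  rw [pvBirths]; simp [h]

lemma pvBirths_ge7 (L : List Int) (d : Nat) (h : 7 ≤ d) :
    pvBirths L d = pvBirths L (d - 7) + (if d < 9 then 0 else pvBirths L (d - 9)) := by
  rw [pvBirths]; simp [Nat.not_lt.mpr h]

lemma pvGetD_set (l : List Int) (i j : Nat) (v d : Int) :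
    (l.set i v).getD j d = if i = j ∧ i < l.length then v else l.getD j d := by
  simp only [List.getD_eq_getElem?_getD, List.getElem?_set]
  by_cases hij : i = j
  · subst hij
    by_cases hl : i < l.length <;> simp [hl]
  · simp [hij]

lemma pvSum_set (l : List Int) (i : Nat) (v : Int) (h : i < l.length) :
    (l.set i v).sum = l.sum - l.getD i 0 + v := by
  have hdrop : l.drop i = l[i] :: l.drop (i + 1) := List.drop_eq_getElem_cons h
  have hsum : (l.take i).sum + (l.drop i).sum = l.sum := List.sum_take_add_sum_drop l i
  rw [hdrop, List.sum_cons] at hsum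
  have hgd : l.getD i 0 = l[i] := by
    simp [List.getD_eq_getElem?_getD, List.getElem?_eq_getElem h]
  rw [List.sum_set, if_pos h, hgd]
  omega

lemma pvGetD_replicate_zero (n j : Nat) : (List.replicate n (0 : Int)).getD j 0 = 0 := by
  by_cases h : j < n
  · exact List.getD_replicate 0 h
  · simp [List.getD_eq_getElem?_getD, h]

lemma pvRange_sum_succ (L0 : List Int) (k : Nat) :
    ((List.range (k + 1)).map (pvBirths L0)).sum
      = ((List.range k).map (pvBirths L0)).sum + pvBirths L0 k := by
  rw [List.range_succ]; simp

-- A's loop: starting from a state that looks like "after k of N days", the final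
-- total is the initial population plus all births up to day N.
lemma pvStepsA_spec (L0 : List Int) (N : Nat) (hN : N ≤ L0.length ∨ 7 ≤ L0.length) :
    ∀ n k L F, k + n = N →
      L.length = L0.length → F.length = 7 →
      (∀ j, j < 7 → j < L.length → L.getD j 0 = pvBirths L0 (k + (j + 7 - k % 7) % 7)) →
      (∀ j, j < 7 → F.getD j 0 = pvFval L0 k j) →
      L.sum + F.sum = L0.sum + ((List.range k).map (pvBirths L0)).sum →
      (pvStepsA L F k n).1.sum + (pvStepsA L F k n).2.sum
        = L0.sum + ((List.range N).map (pvBirths L0)).sum := by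
  intro n
  induction n with
  | zero =>
      intro k L F hkn _ _ _ _ hsum
      have hk : k = N := by omega
      subst hk
      simpa [pvStepsA] using hsum
  | succ n ih =>
      intro k L F hkn hL hF hLpt hFpt hsum
      have hkN : k < N := by omega
      have hiL : k % 7 < L.length := by
        have h7 : k % 7 < 7 := Nat.mod_lt _ (by omega)
        have hle : k % 7 ≤ k := Nat.mod_le _ _
        rcases hN with h | h <;> omega
      have hread : L.getD (k % 7) 0 = pvBirths L0 k := by
        have h := hLpt (k % 7) (Nat.mod_lt _ (by omega)) hiL
        have harg : k + (k % 7 + 7 - k % 7) % 7 = k := by omega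
        rw [h, harg]
      have hFi : F.getD (k % 7) 0 = (if 2 ≤ k then pvBirths L0 (k - 2) else 0) := by
        rw [hFpt (k % 7) (Nat.mod_lt _ (by omega))]
        unfold pvFval
        rw [if_neg (by omega)]
        by_cases h2 : 2 ≤ k
        · rw [if_pos ⟨h2, rfl⟩, if_pos h2]
        · rw [if_neg (by omega), if_neg h2]
      have hmod : (k % 7 + 2) % 7 = (k + 2) % 7 := by
        rw [Nat.add_mod k 2 7]
      simp only [pvStepsA]
      apply ih (k + 1) _ _ (by omega)
      · simp [hL]
      · simp [hF]
      -- pointwise description of the laternfish array after this day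
      · intro j hj7 hjlen
        rw [List.length_set] at hjlen
        rw [pvGetD_set]
        by_cases hij : k % 7 = j
        · rw [if_pos ⟨hij, hiL⟩]
          have harg : k + 1 + (j + 7 - (k + 1) % 7) % 7 = k + 7 := by omega
          rw [harg, pvBirths_ge7 L0 (k + 7) (by omega)]
          have h7 : k + 7 - 7 = k := by omega
          have h9 : k + 7 - 9 = k - 2 := by omega
          rw [h7, h9, hread, hFi]
          by_cases h2 : 2 ≤ k
          · rw [if_pos h2, if_neg (by omega)]
          · rw [if_neg h2, if_pos (by omega)]
        · rw [if_neg (by tauto)]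
          rw [hLpt j hj7 hjlen]
          congr 1
          omega
      -- pointwise description of the fish_additions array after this day
      · intro j hj7
        rw [hmod, pvGetD_set, pvGetD_set]
        have hlF : k % 7 < F.length := by rw [hF]; omega
        have hlF1 : (k + 2) % 7 < (F.set (k % 7) 0).length := by
          rw [List.length_set, hF]; omega
        by_cases hset : (k + 2) % 7 = j
        · rw [if_pos ⟨hset, hlF1⟩]
          unfold pvFval
          rw [if_pos ⟨by omega, by omega⟩]
          simpa using hread
        · rw [if_neg (by tauto)]
          by_cases hzero : k % 7 = j
          · rw [if_pos ⟨hzero, hlF⟩]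
            unfold pvFval
            rw [if_neg (by omega), if_neg (by omega)]
          · rw [if_neg (by tauto), hFpt j hj7]
            unfold pvFval
            by_cases hc : j = (k + 1) % 7
            · by_cases hk1 : 1 ≤ k
              · rw [if_pos ⟨hk1, hc⟩, if_neg (by omega), if_pos ⟨by omega, by omega⟩]
                congr 1
              · rw [if_neg (by omega), if_neg (by omega), if_neg (by omega), if_neg (by omega)]
            · rw [if_neg (by omega), if_neg (by omega), if_neg (by omega), if_neg (by omega)]
      -- the running total
      · have hlF : k % 7 < F.length := by rw [hF]; omega
        have hsetF : (F.set (k % 7) 0).getD ((k + 2) % 7) 0 = 0 := by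
          rw [pvGetD_set, if_neg (by omega), hFpt ((k + 2) % 7) (by omega)]
          unfold pvFval
          rw [if_neg (by omega), if_neg (by omega)]
        rw [hmod, pvSum_set L (k % 7) _ hiL,
            pvSum_set (F.set (k % 7) 0) ((k + 2) % 7) _ (by rw [List.length_set, hF]; omega),
            pvSum_set F (k % 7) 0 hlF, hsetF, hread, pvRange_sum_succ L0 k]
        omega

-- B's loop computes the same quantity
lemma pvStepsB_spec (L0 : List Int) (N : Nat) (hN : N ≤ L0.length ∨ 7 ≤ L0.length) :
    ∀ n k total ring, k + n = N →
      ring.length = 9 →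
      total = L0.sum + ((List.range k).map (pvBirths L0)).sum →
      (∀ d, d < k → k ≤ d + 9 → ring.getD (d % 9) 0 = pvBirths L0 d) →
      (∀ j, k ≤ j → j < 9 → ring.getD j 0 = 0) →
      pvStepsB L0 total ring k n = L0.sum + ((List.range N).map (pvBirths L0)).sum := by
  intro n
  induction n with
  | zero =>
      intro k total ring hkn _ htot _ _
      have hk : k = N := by omega
      subst hk
      simpa [pvStepsB] using htot
  | succ n ih =>
      intro k total ring hkn hlen htot hc1 hc2
      have hkN : k < N := by omega
      have hkL : k < 7 → k < L0.length := by
        rcases hN with h | h <;> omega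
      have hx : (if k < 7 then L0.getD k 0
                 else ring.getD ((k - 7) % 9) 0 + ring.getD (k % 9) 0) = pvBirths L0 k := by
        by_cases h7 : k < 7
        · rw [if_pos h7, pvBirths_lt7 L0 k h7]
        · rw [if_neg h7]
          have hr7 : ring.getD ((k - 7) % 9) 0 = pvBirths L0 (k - 7) :=
            hc1 (k - 7) (by omega) (by omega)
          by_cases h9 : k < 9
          · have hk9 : ring.getD (k % 9) 0 = 0 := by
              have hkk : k % 9 = k := Nat.mod_eq_of_lt h9
              rw [hkk]; exact hc2 k (le_refl k) h9
            rw [hr7, hk9, pvBirths_ge7 L0 k (by omega), if_pos h9]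
          · have hk9 : ring.getD (k % 9) 0 = pvBirths L0 (k - 9) := by
              have hkk : (k - 9) % 9 = k % 9 := by omega
              rw [← hkk]; exact hc1 (k - 9) (by omega) (by omega)
            rw [hr7, hk9, pvBirths_ge7 L0 k (by omega), if_neg h9]
      simp only [pvStepsB]
      apply ih (k + 1) _ _ (by omega)
      · simp [hlen]
      · rw [hx, htot, pvRange_sum_succ L0 k]
        ring
      · intro d hd hd9
        rw [pvGetD_set]
        by_cases hdk : d = k
        · subst hdk
          rw [if_pos ⟨rfl, by omega⟩, hx]
        · rw [if_neg (by omega)]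
          exact hc1 d (by omega) (by omega)
      · intro j hj hj9
        rw [pvGetD_set, if_neg (by omega)]
        exact hc2 j (by omega) hj9

-- ===== VERDICT (by name: the statement is the Claim_ definition above) =====
theorem calc_population_spec : Claim_equal_calc_population := by
  intro L days _ hpre
  unfold Spec_calc_population
  have hN : days.toNat ≤ L.length ∨ 7 ≤ L.length := by
    unfold Pre_calc_population at hpre; omega
  have hA := pvStepsA_spec L days.toNat hN days.toNat 0 L (List.replicate 7 0) (by omega)
      rfl (by simp)
      (by
        intro j hj7 hjlen
        have harg : 0 + (j + 7 - 0 % 7) % 7 = j := by omega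
        rw [harg, pvBirths_lt7 L j hj7])
      (by
        intro j hj7
        rw [pvGetD_replicate_zero]
        unfold pvFval
        rw [if_neg (by omega), if_neg (by omega)])
      (by simp)
  have hB := pvStepsB_spec L days.toNat hN days.toNat 0 L.sum (List.replicate 9 0) (by omega)
      (by simp) (by simp)
      (by intro d hd _; exact absurd hd (Nat.not_lt_zero d))
      (by intro j _ _; exact pvGetD_replicate_zero 9 j)
  simp only [calc_population, calc_population_alt]
  rw [hA, hB]
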